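-- pv_equiv track=rewrite | github.com/mountain/knot-alexander | torsion2.py | get_canonical_path_string_M_then_A
-- ===== SOURCE A (Python) =====
-- def get_canonical_path_string_M_then_A(relator_str, mapping_description):
--     """
--     Generates a canonical path string (all multiplicative-type operations first,
--     then all additive-type operations).
--     Preserves relative order within each type.
--     """
--     additive_chars_list = []
--     multiplicative_chars_list = []
--
--     is_a_multiplicative = "'a' as multiplicative" in mapping_description
--
--     for char_code in relator_str:
--         if is_a_multiplicative:
--             if char_code.lower() == 'a':
--                 multiplicative_chars_list.append(char_code)
--             elif char_code.lower() == 'b':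
--                 additive_chars_list.append(char_code)
--         else:
--             if char_code.lower() == 'b':
--                 multiplicative_chars_list.append(char_code)
--             elif char_code.lower() == 'a':
--                 additive_chars_list.append(char_code)
--
--     # Concatenate: all original multiplicative chars first, then all original additive chars.
--     canonical_path_str = "".join(multiplicative_chars_list) + "".join(additive_chars_list)
--     return canonical_path_str
-- ===== SOURCE B (Python) =====
-- def get_canonical_path_string_M_then_A(relator_str, mapping_description):
--     mult = 'a' if "'a' as multiplicative" in mapping_description else 'b'
--     kept = [c for c in relator_str if c.lower() in ('a', 'b')]
--     return ''.join(sorted(kept, key=lambda c: 0 if c.lower() == mult else 1))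
-- ===== Notes on version B (the rewrite author's own statement) =====
-- stated objective: idiomatic
-- what changed: Replaces the two-accumulator branching loop by a filter of the a/b characters followed by one stable sort on a binary key (multiplicative letter first), relying on sort stability to preserve within-group order.
import Mathlib
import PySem

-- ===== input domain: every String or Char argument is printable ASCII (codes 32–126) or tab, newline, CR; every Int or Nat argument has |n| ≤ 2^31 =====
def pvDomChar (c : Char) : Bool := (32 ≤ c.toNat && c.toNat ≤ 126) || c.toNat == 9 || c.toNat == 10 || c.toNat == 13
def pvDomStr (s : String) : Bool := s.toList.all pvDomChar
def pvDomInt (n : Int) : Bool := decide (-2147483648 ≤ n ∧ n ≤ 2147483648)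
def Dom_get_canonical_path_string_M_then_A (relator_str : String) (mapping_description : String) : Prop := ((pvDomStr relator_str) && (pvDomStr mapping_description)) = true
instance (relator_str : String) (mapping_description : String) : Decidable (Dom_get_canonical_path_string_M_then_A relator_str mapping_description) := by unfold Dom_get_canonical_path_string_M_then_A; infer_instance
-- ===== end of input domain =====

-- B replaces A's two-accumulator branching loop by a filter of the a/b characters followed by
-- one stable sort on a binary key (multiplicative letter first); objective: more idiomatic, same result.

-- ===== PORT A =====
def get_canonical_path_string_M_then_A (relator_str : String) (mapping_description : String) : String :=
  let is_a_multiplicative := PySem.Str.isIn "'a' as multiplicative" mapping_description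
  let st := relator_str.toList.foldl
    (fun (st : List Char × List Char) c =>
      if is_a_multiplicative then
        if PySem.Chars.lowerChar c == 'a' then (st.1 ++ [c], st.2)
        else if PySem.Chars.lowerChar c == 'b' then (st.1, st.2 ++ [c])
        else st
      else
        if PySem.Chars.lowerChar c == 'b' then (st.1 ++ [c], st.2)
        else if PySem.Chars.lowerChar c == 'a' then (st.1, st.2 ++ [c])
        else st)
    ([], [])
  String.ofList (st.1 ++ st.2)

-- ===== PORT B =====
def get_canonical_path_string_M_then_A_alt (relator_str : String) (mapping_description : String) : String :=
  let mult : Char := if PySem.Str.isIn "'a' as multiplicative" mapping_description then 'a' else 'b'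
  let kept := relator_str.toList.filter
    (fun c => PySem.Chars.lowerChar c == 'a' || PySem.Chars.lowerChar c == 'b')
  String.ofList (PySem.List.sorted kept (fun c => if PySem.Chars.lowerChar c == mult then (0 : Int) else 1))

-- ===== PRECONDITION & SPEC =====
def Spec_get_canonical_path_string_M_then_A (relator_str : String) (mapping_description : String) (out : String) : Prop := out = get_canonical_path_string_M_then_A_alt relator_str mapping_description
instance (relator_str : String) (mapping_description : String) (out : String) : Decidable (Spec_get_canonical_path_string_M_then_A relator_str mapping_description out) := by unfold Spec_get_canonical_path_string_M_then_A; infer_instance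

-- ===== CLAIM (what is proved, stated in full; the proofs are below) =====
def Claim_equal_get_canonical_path_string_M_then_A : Prop := ∀ (relator_str : String) (mapping_description : String), Dom_get_canonical_path_string_M_then_A relator_str mapping_description → Spec_get_canonical_path_string_M_then_A relator_str mapping_description (get_canonical_path_string_M_then_A relator_str mapping_description)

-- ===== LEMMAS AND PROOFS =====

-- Inserting a key-0 element into "zeros ++ ones" lands right after the zeros.
theorem pv_insertBy_key0 {α : Type} (key : α → Int) (x : α) (hx : key x = 0)
    (z o : List α) (hz : ∀ c ∈ z, key c = 0) (ho : ∀ c ∈ o, key c = 1) :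
    PySem.List.insertBy (fun a b => decide (key a < key b)) x (z ++ o) = z ++ x :: o := by
  induction z with
  | nil =>
    cases o with
    | nil => simp [PySem.List.insertBy]
    | cons y ys =>
      have hy := ho y (by simp)
      simp [PySem.List.insertBy, hx, hy]
  | cons zh zt ih =>
    have h0 := hz zh (by simp)
    simp only [List.cons_append, PySem.List.insertBy, hx, h0]
    simp only [decide_eq_true_eq]
    rw [if_neg (by omega)]
    rw [ih (fun c hc => hz c (by simp [hc]))]

-- Inserting a key-1 element goes to the very end.
theorem pv_insertBy_key1 {α : Type} (key : α → Int) (x : α) (hx : key x = 1)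
    (ys : List α) (hy : ∀ c ∈ ys, key c = 0 ∨ key c = 1) :
    PySem.List.insertBy (fun a b => decide (key a < key b)) x ys = ys ++ [x] := by
  apply PySem.List.insertBy_of_forall_not_before
  intro y hyy
  rcases hy y hyy with h | h <;> simp [hx, h]

-- The insertion-sort fold on a {0,1}-valued key is exactly the stable two-bucket partition.
theorem pv_foldl_insert_partition {α : Type} (key : α → Int)
    (hk : ∀ a, key a = 0 ∨ key a = 1) :
    ∀ (xs z o : List α), (∀ c ∈ z, key c = 0) → (∀ c ∈ o, key c = 1) →
      xs.foldl (fun acc x => PySem.List.insertBy (fun a b => decide (key a < key b)) x acc) (z ++ o)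
        = (z ++ xs.filter (fun c => key c == 0)) ++ (o ++ xs.filter (fun c => key c == 1)) := by
  intro xs
  induction xs with
  | nil => intro z o _ _; simp
  | cons x xs ih =>
    intro z o hz ho
    rcases hk x with h0 | h1
    · have hz' : ∀ c ∈ z ++ [x], key c = 0 := by
        intro c hc
        rcases List.mem_append.1 hc with h | h
        · exact hz c h
        · simp at h; subst h; exact h0
      have step : PySem.List.insertBy (fun a b => decide (key a < key b)) x (z ++ o)
          = (z ++ [x]) ++ o := by
        rw [pv_insertBy_key0 key x h0 z o hz ho]; simp
      rw [List.foldl_cons, step, ih (z ++ [x]) o hz' ho]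
      simp [h0]
    · have ho' : ∀ c ∈ o ++ [x], key c = 1 := by
        intro c hc
        rcases List.mem_append.1 hc with h | h
        · exact ho c h
        · simp at h; subst h; exact h1
      have hall : ∀ c ∈ z ++ o, key c = 0 ∨ key c = 1 := by
        intro c hc
        rcases List.mem_append.1 hc with h | h
        · exact Or.inl (hz c h)
        · exact Or.inr (ho c h)
      have step : PySem.List.insertBy (fun a b => decide (key a < key b)) x (z ++ o)
          = z ++ (o ++ [x]) := by
        rw [pv_insertBy_key1 key x h1 (z ++ o) hall]; simp
      rw [List.foldl_cons, step, ih z (o ++ [x]) hz ho']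
      simp [h1]

-- sorted on a {0,1}-valued key = filter-0 ++ filter-1 (stability).
theorem pv_sorted_binary {α : Type} (xs : List α) (key : α → Int)
    (hk : ∀ a, key a = 0 ∨ key a = 1) :
    PySem.List.sorted xs key
      = xs.filter (fun c => key c == 0) ++ xs.filter (fun c => key c == 1) := by
  rw [PySem.List.sorted_eq_foldl_insertBy]
  have := pv_foldl_insert_partition key hk xs [] [] (by simp) (by simp)
  simpa using this

-- A's fold is the stable two-bucket partition by its two predicates.
theorem pv_foldl_partition {α : Type} (p q : α → Bool) (xs : List α) (m a : List α) :
    xs.foldl (fun (st : List α × List α) c =>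
        if p c then (st.1 ++ [c], st.2) else if q c then (st.1, st.2 ++ [c]) else st) (m, a)
      = (m ++ xs.filter p, a ++ xs.filter (fun c => !p c && q c)) := by
  induction xs generalizing m a with
  | nil => simp
  | cons x xs ih =>
    by_cases hp : p x
    · simp [hp, ih]
    · by_cases hq : q x
      · simp [hp, hq, ih]
      · simp [hp, hq, ih]

-- ===== VERDICT (by name: the statement is the Claim_ definition above) =====
theorem get_canonical_path_string_M_then_A_spec : Claim_equal_get_canonical_path_string_M_then_A := by
  intro r m _
  unfold Spec_get_canonical_path_string_M_then_A
  unfold get_canonical_path_string_M_then_A get_canonical_path_string_M_then_A_alt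
  cases hflag : PySem.Str.isIn "'a' as multiplicative" m
  · simp only [Bool.false_eq_true, if_false]
    rw [pv_foldl_partition]
    rw [pv_sorted_binary _ _ (fun c => by by_cases h : PySem.Chars.lowerChar c = 'b' <;> simp [h])]
    rw [List.filter_filter, List.filter_filter]
    simp only [List.nil_append]
    congr 1
    congr 1
    · apply List.filter_congr
      intro c _
      by_cases h : PySem.Chars.lowerChar c = 'b' <;> simp [h]
    · apply List.filter_congr
      intro c _
      by_cases h : PySem.Chars.lowerChar c = 'b'
      · simp [h]
      · by_cases h' : PySem.Chars.lowerChar c = 'a'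
        · simp [h, h']
        · rw [beq_eq_false_iff_ne.2 h, beq_eq_false_iff_ne.2 h']; simp
  · simp only [if_true]
    rw [pv_foldl_partition]
    rw [pv_sorted_binary _ _ (fun c => by by_cases h : PySem.Chars.lowerChar c = 'a' <;> simp [h])]
    rw [List.filter_filter, List.filter_filter]
    simp only [List.nil_append]
    congr 1
    congr 1
    · apply List.filter_congr
      intro c _
      by_cases h : PySem.Chars.lowerChar c = 'a' <;> simp [h]
    · apply List.filter_congr
      intro c _
      by_cases h : PySem.Chars.lowerChar c = 'a'
      · simp [h]
      · by_cases h' : PySem.Chars.lowerChar c = 'b'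
        · simp [h, h']
        · rw [beq_eq_false_iff_ne.2 h, beq_eq_false_iff_ne.2 h']; simp
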